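-- pv_equiv track=rewrite | github.com/josegarcia19809/02_python_proyectos | passwords/fuerza_bruta.py | aplicar_fuerza_bruta
-- ===== SOURCE A (Python) =====
-- import itertools
-- import string
-- from typing import Optional
--
-- def aplicar_fuerza_bruta(palabra, longitud, digitos=False, simbolos=False) -> Optional[
--     str]:
--     """Realiza fuerza bruta al encontrar una palabra."""
--
--     # Modifique esto para símbolos totales.
--     combinacion = string.ascii_lowercase
--
--     if digitos:
--         combinacion += string.digits
--
--     if simbolos:
--         combinacion += string.punctuation
--
--     intentos = 0
--     for buscar in itertools.product(combinacion, repeat=longitud):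
--         intentos += 1
--         buscar = ''.join(buscar)
--
--         if buscar == palabra:
--             return f'"{palabra}" fue hackeada en {intentos:,} intentos.'
-- ===== SOURCE B (Python) =====
-- import string
--
--
-- def aplicar_fuerza_bruta(palabra, longitud, digitos=False, simbolos=False):
--     """Computes the attempt count directly as the word's rank in the
--     enumeration order (positional base conversion) instead of enumerating."""
--     combinacion = string.ascii_lowercase
--     if digitos:
--         combinacion += string.digits
--     if simbolos:
--         combinacion += string.punctuation
--
--     if len(palabra) != longitud or any(ch not in combinacion for ch in palabra):
--         return None
--
--     rango = 0
--     base = len(combinacion)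
--     for ch in palabra:
--         rango = rango * base + combinacion.index(ch)
--     return f'"{palabra}" fue hackeada en {rango + 1:,} intentos.'
-- ===== Notes on version B (the rewrite author's own statement) =====
-- stated objective: faster
-- what changed: Instead of enumerating all strings of the given length until the word appears, B computes the word's 1-based rank in the enumeration order directly by positional base conversion over the charset, returning None when the length or charset does not match.
import Mathlib
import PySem

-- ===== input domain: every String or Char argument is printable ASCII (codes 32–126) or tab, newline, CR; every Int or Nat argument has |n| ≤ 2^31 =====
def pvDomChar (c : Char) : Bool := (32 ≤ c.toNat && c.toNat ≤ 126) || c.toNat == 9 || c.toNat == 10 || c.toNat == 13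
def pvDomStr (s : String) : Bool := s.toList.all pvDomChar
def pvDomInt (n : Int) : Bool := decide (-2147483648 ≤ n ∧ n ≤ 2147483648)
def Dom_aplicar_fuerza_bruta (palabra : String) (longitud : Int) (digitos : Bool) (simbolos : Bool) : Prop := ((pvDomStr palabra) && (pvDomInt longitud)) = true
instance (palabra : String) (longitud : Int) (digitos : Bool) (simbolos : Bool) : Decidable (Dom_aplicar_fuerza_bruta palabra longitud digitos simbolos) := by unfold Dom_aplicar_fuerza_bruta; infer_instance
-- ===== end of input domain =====

-- B replaces A's O(base^longitud) enumeration by computing the word's rank directly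
-- via positional base conversion (objective: faster, asymptotic).

-- Shared formatting helpers (Python's f'"{palabra}" fue hackeada en {intentos:,} intentos.').
-- pvComma inserts ',' every 3 digits, operating on the REVERSED digit list (exact for
-- nonnegative integers, which is all both programs format).
def pvComma : List Char → List Char
  | a :: b :: c :: d :: rest => a :: b :: c :: ',' :: pvComma (d :: rest)
  | l => l

def pvFmt (n : Nat) : String := String.ofList ((pvComma (PySem.Int.toStr (n : Int)).toList.reverse).reverse)

def pvMsg (palabra : String) (intentos : Nat) : String :=
  "\"" ++ palabra ++ "\" fue hackeada en " ++ pvFmt intentos ++ " intentos."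

-- combinacion = ascii_lowercase (+ digits) (+ punctuation)
def pvCombinacion (digitos simbolos : Bool) : List Char :=
  "abcdefghijklmnopqrstuvwxyz".toList
    ++ (if digitos then "0123456789".toList else [])
    ++ (if simbolos then "!\"#$%&'()*+,-./:;<=>?@[\\]^_`{|}~".toList else [])

-- ===== PORT A =====
-- itertools.product(combinacion, repeat=n) in order: all words of length n, lexicographic by position.
def pvAllWords (chars : List Char) : Nat → List (List Char)
  | 0 => [[]]
  | n + 1 => chars.flatMap (fun c => (pvAllWords chars n).map (fun w => c :: w))

-- A's for-loop with the 'intentos' counter.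
def pvGoA (pal : List Char) (palabra : String) : List (List Char) → Nat → Option String
  | [], _ => none
  | w :: rest, intentos =>
    if w = pal then some (pvMsg palabra (intentos + 1)) else pvGoA pal palabra rest (intentos + 1)

def aplicar_fuerza_bruta (palabra : String) (longitud : Int) (digitos : Bool) (simbolos : Bool) : Option String :=
  if longitud < 0 then none  -- Python raises ValueError here; excluded by Pre_
  else pvGoA palabra.toList palabra (pvAllWords (pvCombinacion digitos simbolos) longitud.toNat) 0

-- ===== PORT B =====
def aplicar_fuerza_bruta_alt (palabra : String) (longitud : Int) (digitos : Bool) (simbolos : Bool) : Option String :=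
  let chars := pvCombinacion digitos simbolos
  let pal := palabra.toList
  if (pal.length : Int) = longitud ∧ pal.all (fun c => chars.contains c) then
    -- combinacion.index ch, always called on a member, is List.idxOf (first occurrence)
    some (pvMsg palabra (pal.foldl (fun r c => r * chars.length + chars.idxOf c) 0 + 1))
  else none

-- ===== PRECONDITION & SPEC =====
-- Pre_ excludes negative longitud, on which Python A raises ValueError (itertools.product).
def Pre_aplicar_fuerza_bruta (palabra : String) (longitud : Int) (digitos : Bool) (simbolos : Bool) : Prop :=
  0 ≤ longitud
instance (palabra : String) (longitud : Int) (digitos : Bool) (simbolos : Bool) : Decidable (Pre_aplicar_fuerza_bruta palabra longitud digitos simbolos) := by unfold Pre_aplicar_fuerza_bruta; infer_instance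

def pvWitness_aplicar_fuerza_bruta : String × Int × Bool × Bool := ("ab", 2, false, false)

def Spec_aplicar_fuerza_bruta (palabra : String) (longitud : Int) (digitos : Bool) (simbolos : Bool) (out : Option String) : Prop := out = aplicar_fuerza_bruta_alt palabra longitud digitos simbolos
instance (palabra : String) (longitud : Int) (digitos : Bool) (simbolos : Bool) (out : Option String) : Decidable (Spec_aplicar_fuerza_bruta palabra longitud digitos simbolos out) := by unfold Spec_aplicar_fuerza_bruta; infer_instance

-- ===== CLAIM (what is proved, stated in full; the proofs are below) =====
def Claim_equal_aplicar_fuerza_bruta : Prop := ∀ (palabra : String) (longitud : Int) (digitos : Bool) (simbolos : Bool), Dom_aplicar_fuerza_bruta palabra longitud digitos simbolos → Pre_aplicar_fuerza_bruta palabra longitud digitos simbolos → Spec_aplicar_fuerza_bruta palabra longitud digitos simbolos (aplicar_fuerza_bruta palabra longitud digitos simbolos)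


-- ===== LEMMAS AND PROOFS =====

def pvRank (chars : List Char) (pal : List Char) : Nat :=
  pal.foldl (fun r c => r * chars.length + chars.idxOf c) 0

-- A's loop returns the message for the 1-based index of the first match.
theorem pvGoA_eq_findIdx? (pal : List Char) (s : String) (ws : List (List Char)) (k : Nat) :
    pvGoA pal s ws k = (ws.findIdx? (fun w => w == pal)).map (fun p => pvMsg s (k + p + 1)) := by
  induction ws generalizing k with
  | nil => simp [pvGoA]
  | cons w rest ih =>
    by_cases h : w = pal
    · simp [pvGoA, h, List.findIdx?_cons]
    · simp [pvGoA, h, List.findIdx?_cons, ih (k + 1), Option.map_map]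
      rcases rest.findIdx? (fun w => w == pal) with _ | p <;> simp [Function.comp]
      ring_nf

theorem pvAllWords_length (chars : List Char) (n : Nat) :
    (pvAllWords chars n).length = chars.length ^ n := by
  induction n with
  | zero => simp [pvAllWords]
  | succ n ih =>
    simp [pvAllWords, List.length_flatMap, ih, Function.comp]
    simp [List.map_const', pow_succ, Nat.mul_comm]

theorem pvFoldl_shift (chars : List Char) (t : List Char) (r : Nat) :
    t.foldl (fun r c => r * chars.length + chars.idxOf c) r
      = r * chars.length ^ t.length + pvRank chars t := by
  induction t generalizing r with
  | nil => simp [pvRank]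
  | cons a t ih =>
    simp only [List.foldl_cons, pvRank, List.length_cons]
    rw [ih, ih (0 * chars.length + chars.idxOf a)]
    ring

-- position of a word in the inner blocks of pvAllWords (chars) (n+1), iterating over cs
theorem pvFind_blocks (chars : List Char) (n : Nat) (a : Char) (t : List Char)
    (IH : ∀ pal : List Char,
      (pvAllWords chars n).findIdx? (fun w => w == pal)
        = if pal.length = n ∧ ∀ c ∈ pal, c ∈ chars then some (pvRank chars pal) else none) :
    ∀ cs : List Char,
    ((cs.flatMap (fun c => (pvAllWords chars n).map (fun w => c :: w))).findIdx?
        (fun w => w == a :: t))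
      = if a ∈ cs ∧ t.length = n ∧ ∀ c ∈ t, c ∈ chars then
          some (cs.idxOf a * chars.length ^ n + pvRank chars t)
        else none := by
  intro cs
  induction cs with
  | nil => simp
  | cons c cs ihc =>
    rw [List.flatMap_cons, List.findIdx?_append, List.findIdx?_map]
    by_cases hca : c = a
    · subst hca
      have hblock : ((fun w => w == c :: t) ∘ fun w => c :: w) = (fun w => w == t) := by
        funext w; simp
      rw [hblock, IH t]
      by_cases ht : t.length = n ∧ ∀ c ∈ t, c ∈ chars
      · rw [if_pos ht, if_pos ⟨List.mem_cons_self, ht⟩, List.idxOf_cons_self]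
        simp
      · rw [if_neg ht, Option.none_or, ihc]
        rw [if_neg (by tauto), if_neg (by tauto)]
        simp
    · have hblock : ((fun w => w == a :: t) ∘ fun w => c :: w) = (fun _ => false) := by
        funext w; simp [hca]
      rw [hblock, List.findIdx?_eq_none_iff.mpr (by simp), Option.none_or, ihc,
        List.length_map, pvAllWords_length]
      by_cases hmem : a ∈ cs ∧ t.length = n ∧ ∀ c ∈ t, c ∈ chars
      · rw [if_pos hmem, if_pos ⟨List.mem_cons_of_mem c hmem.1, hmem.2⟩]
        rw [List.idxOf_cons_ne _ hca]
        simp only [Option.map_some]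
        congr 1
        rw [Nat.succ_eq_add_one]
        ring
      · rw [if_neg hmem, if_neg (by
          rintro ⟨hac, h2⟩
          rcases List.mem_cons.mp hac with h | h
          · exact hca h.symm
          · exact hmem ⟨h, h2⟩)]
        simp

theorem pvFind (chars : List Char) (n : Nat) : ∀ pal : List Char,
    (pvAllWords chars n).findIdx? (fun w => w == pal)
      = if pal.length = n ∧ ∀ c ∈ pal, c ∈ chars then some (pvRank chars pal) else none := by
  induction n with
  | zero =>
    intro pal
    cases pal with
    | nil => simp [pvAllWords, pvRank]
    | cons a t => simp [pvAllWords]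
  | succ n ih =>
    intro pal
    cases pal with
    | nil =>
      rw [show pvAllWords chars (n+1) = chars.flatMap (fun c => (pvAllWords chars n).map (fun w => c :: w)) from rfl]
      rw [List.findIdx?_eq_none_iff.mpr ?_]
      · simp
      · intro w hw
        simp only [List.mem_flatMap, List.mem_map] at hw
        obtain ⟨c, _, w', _, rfl⟩ := hw
        simp
    | cons a t =>
      rw [show pvAllWords chars (n+1) = chars.flatMap (fun c => (pvAllWords chars n).map (fun w => c :: w)) from rfl]
      rw [pvFind_blocks chars n a t ih chars]
      have hcond : (a ∈ chars ∧ t.length = n ∧ ∀ c ∈ t, c ∈ chars)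
          ↔ ((a :: t).length = n + 1 ∧ ∀ c ∈ a :: t, c ∈ chars) := by
        simp [List.length_cons]; tauto
      by_cases h : a ∈ chars ∧ t.length = n ∧ ∀ c ∈ t, c ∈ chars
      · rw [if_pos h, if_pos (hcond.mp h)]
        have : pvRank chars (a :: t) = chars.idxOf a * chars.length ^ t.length + pvRank chars t := by
          simp only [pvRank, List.foldl_cons]
          have := pvFoldl_shift chars t (chars.idxOf a)
          simpa [pvRank] using this
        rw [this, h.2.1]
      · rw [if_neg h, if_neg (fun hc => h (hcond.mpr hc))]

-- ===== VERDICT (by name: the statement is the Claim_ definition above) =====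
theorem aplicar_fuerza_bruta_spec : Claim_equal_aplicar_fuerza_bruta := by
  intro palabra longitud digitos simbolos _hdom hpre
  unfold Spec_aplicar_fuerza_bruta aplicar_fuerza_bruta aplicar_fuerza_bruta_alt
  have hneg : ¬ longitud < 0 := by exact not_lt.mpr hpre
  rw [if_neg hneg]
  rw [pvGoA_eq_findIdx?, pvFind]
  set chars := pvCombinacion digitos simbolos with hch
  have hlen : (palabra.toList.length = longitud.toNat)
      ↔ ((palabra.toList.length : Int) = longitud) := by omega
  have hall : (∀ c ∈ palabra.toList, c ∈ chars)
      ↔ (palabra.toList.all (fun c => chars.contains c) = true) := by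
    simp
  by_cases h : palabra.toList.length = longitud.toNat ∧ ∀ c ∈ palabra.toList, c ∈ chars
  · rw [if_pos h, if_pos ⟨hlen.mp h.1, hall.mp h.2⟩]
    simp [pvRank]
  · rw [if_neg h, if_neg ?_]
    · simp
    · rintro ⟨h1, h2⟩
      exact h ⟨hlen.mpr h1, hall.mpr h2⟩
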